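-- pv_equiv track=rewrite | github.com/viskai/optimiseur-edt | app.py | find_anchor_triplet
-- ===== SOURCE A (Python) =====
-- from collections import defaultdict, Counter
-- import itertools
--
-- def find_anchor_triplet(student_choices):
--     pair_counts = Counter(p for c in student_choices.values() for p in itertools.combinations(sorted(c), 2))
--     if not pair_counts: return None
--     unique_specs = sorted(list(set(s for c in student_choices.values() for s in c)))
--     best_triplet, max_score = None, -1
--     for triplet in itertools.combinations(unique_specs, 3):
--         t = tuple(sorted(triplet))
--         p1, p2, p3 = (t[0], t[1]), (t[0], t[2]), (t[1], t[2])
--         if pair_counts[p1] > 0 and pair_counts[p2] > 0 and pair_counts[p3] > 0: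
--             score = pair_counts[p1] + pair_counts[p2] + pair_counts[p3]
--             if score > max_score: max_score, best_triplet = score, t
--     return best_triplet
-- ===== SOURCE B (Python) =====
-- from collections import defaultdict, Counter
-- import itertools
--
-- def find_anchor_triplet(student_choices):
--     pair_counts = Counter(p for c in student_choices.values() for p in itertools.combinations(sorted(c), 2))
--     if not pair_counts:
--         return None
--     unique_specs = sorted(list(set(s for c in student_choices.values() for s in c)))
--     # adjacency: for every counted pair (a, b) with a < b, record b as a higher neighbour of a
--     adj = defaultdict(list)
--     for a, b in pair_counts:
--         if a != b:
--             adj[a].append(b)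
--     best_triplet, max_score = None, -1
--     # enumerate triangles (u < v < w) of the co-occurrence graph instead of all spec triplets
--     for u in unique_specs:
--         nu = adj[u]
--         nu_set = set(nu)
--         for v in sorted(nu):
--             for w in sorted(adj[v]):
--                 if w in nu_set:
--                     score = pair_counts[(u, v)] + pair_counts[(u, w)] + pair_counts[(v, w)]
--                     if score > max_score:
--                         max_score, best_triplet = score, (u, v, w)
--     return best_triplet
-- ===== Notes on version B (the rewrite author's own statement) =====
-- stated objective: faster
-- what changed: A scans all C(S,3) triplets of specialization names and tests the three pair counts for each; B builds adjacency lists of the pair co-occurrence graph once and enumerates only its triangles (u<v<w via higher-neighbour lists), keeping the same max-score, first-in-lexicographic-order tie-breaking.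
import Mathlib
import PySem

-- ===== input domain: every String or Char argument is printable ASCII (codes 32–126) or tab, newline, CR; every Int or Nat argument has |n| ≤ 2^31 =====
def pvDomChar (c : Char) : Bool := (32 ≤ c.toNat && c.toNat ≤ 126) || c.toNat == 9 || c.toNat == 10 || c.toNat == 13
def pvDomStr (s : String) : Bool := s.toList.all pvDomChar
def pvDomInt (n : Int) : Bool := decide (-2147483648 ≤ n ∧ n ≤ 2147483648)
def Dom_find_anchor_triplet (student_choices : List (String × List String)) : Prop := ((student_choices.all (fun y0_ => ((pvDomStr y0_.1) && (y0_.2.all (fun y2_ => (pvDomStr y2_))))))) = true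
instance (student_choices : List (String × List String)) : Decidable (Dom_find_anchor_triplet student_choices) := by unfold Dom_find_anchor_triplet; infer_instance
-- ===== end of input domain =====

-- B replaces A's scan over ALL triplets of specialization names by an enumeration of the
-- triangles of the co-occurrence graph (adjacency lists of higher neighbours); same result,
-- measurably faster on sparse co-occurrence data.

-- ===== PORT A =====
-- shared with port B: both Python sources compute pair_counts and unique_specs by the same lines
-- Counter keys are Python 2-tuples from itertools.combinations; modelled as 2-element lists
def pvAllPairs (student_choices : List (String × List String)) : List (List String) :=
  (student_choices.map Prod.snd).flatMap
    (fun c => PySem.List.combinations (PySem.List.sorted c (fun s => s)) 2)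

def pvPairCounts (student_choices : List (String × List String)) : PySem.Dict (List String) Int :=
  PySem.Dict.counter (pvAllPairs student_choices)

def pvUniqueSpecs (student_choices : List (String × List String)) : List String :=
  PySem.List.sorted (PySem.Set.ofList ((student_choices.map Prod.snd).flatMap (fun c => c))) (fun s => s)

-- one iteration of A's loop over itertools.combinations(unique_specs, 3);
-- sorted of a 3-combination always has exactly 3 elements, so the wildcard branch is unreachable
def pvAStep (pc : PySem.Dict (List String) Int) (st : Option (List String) × Int) (triplet : List String) :
    Option (List String) × Int :=
  match PySem.List.sorted triplet (fun s => s) with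
  | [a, b, c] =>
    if pc.getD [a, b] 0 > 0 ∧ pc.getD [a, c] 0 > 0 ∧ pc.getD [b, c] 0 > 0 then
      let score := pc.getD [a, b] 0 + pc.getD [a, c] 0 + pc.getD [b, c] 0
      if score > st.2 then (some [a, b, c], score) else st
    else st
  | _ => st

def find_anchor_triplet (student_choices : List (String × List String)) : Option (List String) :=
  let pair_counts := pvPairCounts student_choices
  if pair_counts.size = 0 then none
  else
    ((PySem.List.combinations (pvUniqueSpecs student_choices) 3).foldl
      (pvAStep pair_counts) (none, -1)).1

-- ===== PORT B =====
-- adjacency build: for every counted pair (a, b) with a ≠ b record b as a higher neighbour of a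
-- (Counter keys are always 2-tuples, so the wildcard branch is unreachable; defaultdict(list) = getD/modify with [])
def pvBuildAdj (pc : PySem.Dict (List String) Int) : PySem.Dict String (List String) :=
  pc.keys.foldl
    (fun d p =>
      match p with
      | [a, b] => if a ≠ b then d.modify a [] (· ++ [b]) else d
      | _ => d)
    PySem.Dict.empty

-- one iteration of B's outer loop over unique_specs (triangle enumeration u < v < w)
def pvBStep (pc : PySem.Dict (List String) Int) (adj : PySem.Dict String (List String))
    (st : Option (List String) × Int) (u : String) : Option (List String) × Int :=
  let nu := adj.getD u []
  let nuset := PySem.Set.ofList nu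
  (PySem.List.sorted nu (fun s => s)).foldl
    (fun st v =>
      (PySem.List.sorted (adj.getD v []) (fun s => s)).foldl
        (fun st w =>
          if nuset.contains w then
            let score := pc.getD [u, v] 0 + pc.getD [u, w] 0 + pc.getD [v, w] 0
            if score > st.2 then (some [u, v, w], score) else st
          else st)
        st)
    st

def find_anchor_triplet_alt (student_choices : List (String × List String)) : Option (List String) :=
  let pair_counts := pvPairCounts student_choices
  if pair_counts.size = 0 then none
  else
    let adj := pvBuildAdj pair_counts
    ((pvUniqueSpecs student_choices).foldl (pvBStep pair_counts adj) (none, -1)).1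

-- ===== PRECONDITION & SPEC =====
def Spec_find_anchor_triplet (student_choices : List (String × List String)) (out : Option (List String)) : Prop := out = find_anchor_triplet_alt student_choices
instance (student_choices : List (String × List String)) (out : Option (List String)) : Decidable (Spec_find_anchor_triplet student_choices out) := by unfold Spec_find_anchor_triplet; infer_instance

-- ===== CLAIM (what is proved, stated in full; the proofs are below) =====
def Claim_equal_find_anchor_triplet : Prop := ∀ (student_choices : List (String × List String)), Dom_find_anchor_triplet student_choices → Spec_find_anchor_triplet student_choices (find_anchor_triplet student_choices)

-- ===== LEMMAS AND PROOFS =====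

-- A's loop step with the (always-identity) re-sort removed
def pvAStep' (pc : PySem.Dict (List String) Int) (st : Option (List String) × Int) (triplet : List String) :
    Option (List String) × Int :=
  match triplet with
  | [a, b, c] =>
    if pc.getD [a, b] 0 > 0 ∧ pc.getD [a, c] 0 > 0 ∧ pc.getD [b, c] 0 > 0 then
      let score := pc.getD [a, b] 0 + pc.getD [a, c] 0 + pc.getD [b, c] 0
      if score > st.2 then (some [a, b, c], score) else st
    else st
  | _ => st

-- the shared score update
def pvUpd (pc : PySem.Dict (List String) Int) (st : Option (List String) × Int) (u v w : String) :
    Option (List String) × Int :=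
  let score := pc.getD [u, v] 0 + pc.getD [u, w] 0 + pc.getD [v, w] 0
  if score > st.2 then (some [u, v, w], score) else st

-- which neighbour a counted pair key contributes to x's adjacency list
def pvPick (x : String) (p : List String) : Option String :=
  match p with
  | [a, b] => if a = x ∧ a ≠ b then some b else none
  | _ => none

-- B's inner two loops, for a fixed u and v
def pvInner (pc : PySem.Dict (List String) Int) (adj : PySem.Dict String (List String))
    (u v : String) (st : Option (List String) × Int) : Option (List String) × Int :=
  (PySem.List.sorted (adj.getD v []) (fun s => s)).foldl
    (fun st w =>
      if (PySem.Set.ofList (adj.getD u [])).contains w then pvUpd pc st u v w else st)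
    st

lemma pv_foldl_id {α β : Type} (l : List α) (st : β) : l.foldl (fun st _ => st) st = st := by
  induction l <;> simp [List.foldl, *]

lemma pv_pairs_shape (sc : List (String × List String)) :
    ∀ p ∈ pvAllPairs sc, ∃ a b, p = [a, b] ∧ a ≤ b ∧ a ∈ pvUniqueSpecs sc ∧ b ∈ pvUniqueSpecs sc := by
  intro p hp
  unfold pvAllPairs at hp
  rcases List.mem_flatMap.mp hp with ⟨c, hc, hpc⟩
  rcases (PySem.List.mem_combinations_iff _ _ _).mp hpc with ⟨hsub, hlen⟩
  have hmemS : ∀ x ∈ p, x ∈ pvUniqueSpecs sc := by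
    intro x hx
    have hx1 : x ∈ PySem.List.sorted c (fun s => s) := hsub.mem hx
    have hx2 : x ∈ c := (PySem.List.mem_sorted _ _ _ _).mp hx1
    unfold pvUniqueSpecs
    rw [PySem.List.mem_sorted, PySem.Set.mem_ofList]
    exact List.mem_flatMap.mpr ⟨c, hc, hx2⟩
  match p, hlen with
  | [a, b], _ =>
    have hpw : List.Pairwise (fun x y => x ≤ y) [a, b] :=
      List.Pairwise.sublist hsub (PySem.List.sorted_pairwise c (fun s => s))
    refine ⟨a, b, rfl, ?_, hmemS a (by simp), hmemS b (by simp)⟩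
    simpa using hpw

lemma pv_specs_lt (sc : List (String × List String)) :
    (pvUniqueSpecs sc).Pairwise (· < ·) := by
  exact PySem.List.sorted_ofList_pairwise_lt _

lemma pv_buildAdj_getD (L : List (List String)) (d : PySem.Dict String (List String)) (x : String) :
    ((L.foldl
      (fun d p =>
        match p with
        | [a, b] => if a ≠ b then d.modify a [] (· ++ [b]) else d
        | _ => d) d).getD x [])
    = d.getD x [] ++ L.filterMap (pvPick x) := by
  induction L generalizing d with
  | nil => simp
  | cons p L ih =>
    rw [List.foldl_cons, List.filterMap_cons]
    match p with
    | [] => rw [ih]; simp [pvPick]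
    | [a] => rw [ih]; simp [pvPick]
    | a :: b :: c :: t => rw [ih]; simp [pvPick]
    | [a, b] =>
      by_cases hab : a = b
      · show (List.foldl _ (if a ≠ b then _ else d) L).getD x [] = _
        rw [if_neg (by simp [hab]), ih]
        simp [pvPick, hab]
      · show (List.foldl _ (if a ≠ b then PySem.Dict.modify d a [] (· ++ [b]) else d) L).getD x [] = _
        rw [if_pos hab, ih, PySem.Dict.getD_modify]
        by_cases hax : x = a
        · subst hax
          simp [pvPick, hab, List.append_assoc]
        · rw [if_neg hax]
          have : pvPick x [a, b] = none := by
            unfold pvPick; simp; intro h; exact absurd h.symm hax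
          simp [this]

lemma pv_adj_eq (P : List (List String)) (x : String) :
    (pvBuildAdj (PySem.Dict.counter P)).getD x [] = (PySem.Set.ofList P).filterMap (pvPick x) := by
  unfold pvBuildAdj
  rw [pv_buildAdj_getD, PySem.Dict.getD_empty, PySem.Dict.keys_counter]
  simp

lemma pv_mem_adj (P : List (List String)) (S : List String)
    (Hshape : ∀ p ∈ P, ∃ a b, p = [a, b] ∧ a ≤ b ∧ a ∈ S ∧ b ∈ S) (x w : String) :
    w ∈ (pvBuildAdj (PySem.Dict.counter P)).getD x [] ↔ [x, w] ∈ P ∧ x ≠ w := by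
  rw [pv_adj_eq, List.mem_filterMap]
  constructor
  · rintro ⟨p, hp, hpick⟩
    have hpP : p ∈ P := (PySem.Set.mem_ofList _ _).mp hp
    rcases Hshape p hpP with ⟨a, b, rfl, _, _, _⟩
    unfold pvPick at hpick
    simp only at hpick
    split_ifs at hpick with h
    · rcases h with ⟨rfl, hne⟩
      have hbw : b = w := by simpa using hpick
      subst hbw
      exact ⟨hpP, hne⟩
  · rintro ⟨hmem, hne⟩
    refine ⟨[x, w], (PySem.Set.mem_ofList _ _).mpr hmem, ?_⟩
    unfold pvPick
    simp [hne]

lemma pv_nodup_adj (P : List (List String)) (x : String) :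
    ((pvBuildAdj (PySem.Dict.counter P)).getD x []).Nodup := by
  rw [pv_adj_eq]
  refine List.Nodup.filterMap ?_ (PySem.Set.nodup_ofList _)
  have key : ∀ (p : List String) (b : String), b ∈ pvPick x p → p = [x, b] := by
    intro p b hb
    unfold pvPick at hb
    match p with
    | [] => simp at hb
    | [a] => simp at hb
    | a :: c :: e :: t => simp at hb
    | [a, c] =>
      simp only at hb
      split_ifs at hb with h
      · have : c = b := by simpa using hb
        rw [h.1, this]
      · simp at hb
  intro p q b hb hb'
  rw [key p b hb, key q b hb']

lemma pv_lt_of_split (S q l : List String) (HS : S.Pairwise (· < ·)) (h : S = q ++ l) :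
    ∀ a ∈ q, ∀ b ∈ l, a < b := by
  subst h
  exact (List.pairwise_append.mp HS).2.2

lemma pv_sorted_adj (P : List (List String)) (S : List String)
    (Hshape : ∀ p ∈ P, ∃ a b, p = [a, b] ∧ a ≤ b ∧ a ∈ S ∧ b ∈ S)
    (HS : S.Pairwise (· < ·)) (q xs : List String) (x : String) (h : S = q ++ x :: xs) :
    PySem.List.sorted ((pvBuildAdj (PySem.Dict.counter P)).getD x []) (fun s => s)
      = xs.filter (fun v => decide ([x, v] ∈ P)) := by
  have hxxs : (x :: xs).Pairwise (· < ·) := (List.pairwise_append.mp (h ▸ HS)).2.1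
  have hxs : xs.Pairwise (· < ·) := (List.pairwise_cons.mp hxxs).2
  have hxlt : ∀ a ∈ xs, x < a := (List.pairwise_cons.mp hxxs).1
  have hfpw : (xs.filter (fun v => decide ([x, v] ∈ P))).Pairwise (· < ·) := hxs.filter _
  apply PySem.List.sorted_eq_of_perm_of_pairwise_lt
  · refine (List.perm_ext_iff_of_nodup (hfpw.imp ne_of_lt) (pv_nodup_adj P x)).mpr ?_
    intro a
    rw [List.mem_filter, pv_mem_adj P S Hshape, decide_eq_true_iff]
    constructor
    · rintro ⟨ha, hp⟩
      exact ⟨hp, ne_of_lt (hxlt a ha)⟩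
    · rintro ⟨hp, hne⟩
      rcases Hshape _ hp with ⟨a', b', heq, hle, _, hbS⟩
      injection heq with h1 h2
      injection h2 with h3 _
      subst h1; subst h3
      rw [h] at hbS
      rcases List.mem_append.mp hbS with hq | hxa
      · exact absurd (pv_lt_of_split S q (x :: xs) HS h a hq x (by simp)) (by
          intro hlt; exact absurd (lt_of_le_of_lt hle hlt) (lt_irrefl _))
      · rcases List.mem_cons.mp hxa with rfl | hmem
        · exact absurd rfl hne
        · exact ⟨hmem, hp⟩
  · exact hfpw

lemma pv_chunk (P : List (List String)) (S : List String)
    (Hshape : ∀ p ∈ P, ∃ a b, p = [a, b] ∧ a ≤ b ∧ a ∈ S ∧ b ∈ S)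
    (HS : S.Pairwise (· < ·)) (u v : String) (q2 ys : List String)
    (h : S = q2 ++ v :: ys) (hu : u ∈ q2) (st : Option (List String) × Int) :
    (if decide ([u, v] ∈ P) = true
      then pvInner (PySem.Dict.counter P) (pvBuildAdj (PySem.Dict.counter P)) u v st else st)
    = ys.foldl (fun st w => pvAStep' (PySem.Dict.counter P) st [u, v, w]) st := by
  have hcont : ∀ w, ((PySem.Set.ofList ((pvBuildAdj (PySem.Dict.counter P)).getD u [])).contains w = true)
      ↔ ([u, w] ∈ P ∧ u ≠ w) := by
    intro w
    rw [PySem.Set.contains_iff, PySem.Set.mem_ofList, pv_mem_adj P S Hshape]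
  by_cases hv : [u, v] ∈ P
  · rw [if_pos (by simpa using hv)]
    unfold pvInner
    rw [pv_sorted_adj P S Hshape HS q2 ys v h, List.foldl_filter]
    apply PySem.List.foldl_congr_mem
    intro st w hw
    have huw : u < w := pv_lt_of_split S q2 (v :: ys) HS h u hu w (by simp [hw])
    by_cases h1 : [v, w] ∈ P <;> by_cases h2 : [u, w] ∈ P <;>
      simp [pvAStep', pvUpd, hv, h1, h2, pv_mem_adj P S Hshape, ne_of_lt huw]
  · rw [if_neg (by simpa using hv)]
    rw [PySem.List.foldl_congr_mem _ _ (fun st _ => st) st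
      (by intro st w hw; simp [pvAStep', hv]), pv_foldl_id]

lemma pv_sub2 (P : List (List String)) (S : List String)
    (Hshape : ∀ p ∈ P, ∃ a b, p = [a, b] ∧ a ≤ b ∧ a ∈ S ∧ b ∈ S)
    (HS : S.Pairwise (· < ·)) (u : String) :
    ∀ (xs q2 : List String), S = q2 ++ xs → u ∈ q2 → ∀ st,
      xs.foldl
        (fun st v => if decide ([u, v] ∈ P) = true
          then pvInner (PySem.Dict.counter P) (pvBuildAdj (PySem.Dict.counter P)) u v st else st) st
      = (PySem.List.combinations xs 2).foldl
          (fun st p => pvAStep' (PySem.Dict.counter P) st (u :: p)) st := by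
  intro xs
  induction xs with
  | nil => intro q2 h hu st; simp [PySem.List.combinations_nil_succ]
  | cons v ys ih =>
    intro q2 h hu st
    rw [List.foldl_cons, PySem.List.combinations_cons_succ, List.foldl_append, List.foldl_map,
      PySem.List.combinations_one, List.foldl_map]
    rw [ih (q2 ++ [v]) (by simp [h]) (by simp [hu])]
    congr 1
    exact pv_chunk P S Hshape HS u v q2 ys h hu st

lemma pv_main (P : List (List String)) (S : List String)
    (Hshape : ∀ p ∈ P, ∃ a b, p = [a, b] ∧ a ≤ b ∧ a ∈ S ∧ b ∈ S)
    (HS : S.Pairwise (· < ·)) :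
    ∀ (l q : List String), S = q ++ l → ∀ st,
      l.foldl (pvBStep (PySem.Dict.counter P) (pvBuildAdj (PySem.Dict.counter P))) st
      = (PySem.List.combinations l 3).foldl (pvAStep' (PySem.Dict.counter P)) st := by
  intro l
  induction l with
  | nil => intro q h st; simp [PySem.List.combinations_nil_succ]
  | cons u xs ih =>
    intro q h st
    rw [List.foldl_cons, PySem.List.combinations_cons_succ, List.foldl_append, List.foldl_map]
    rw [ih (q ++ [u]) (by simp [h])]
    congr 1
    have hb : pvBStep (PySem.Dict.counter P) (pvBuildAdj (PySem.Dict.counter P)) st u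
        = ((pvBuildAdj (PySem.Dict.counter P)).getD u [] |> (fun nu =>
            (PySem.List.sorted nu (fun s => s)).foldl
              (fun st v => pvInner (PySem.Dict.counter P) (pvBuildAdj (PySem.Dict.counter P)) u v st) st)) := by
      rfl
    rw [hb]
    simp only
    rw [pv_sorted_adj P S Hshape HS q xs u h, List.foldl_filter]
    exact pv_sub2 P S Hshape HS u xs (q ++ [u]) (by simp [h]) (by simp) st

lemma pv_astep_eq (pc : PySem.Dict (List String) Int) (S : List String) (HS : S.Pairwise (· < ·)) :
    ∀ st, ∀ t ∈ PySem.List.combinations S 3, pvAStep pc st t = pvAStep' pc st t := by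
  intro st t ht
  rcases (PySem.List.mem_combinations_iff S 3 t).mp ht with ⟨hsub, hlen⟩
  have hpw : t.Pairwise (fun a b => a ≤ b) :=
    (List.Pairwise.sublist hsub HS).imp le_of_lt
  unfold pvAStep pvAStep'
  rw [PySem.List.sorted_eq_self_of_pairwise t (fun s => s) hpw]

-- ===== VERDICT (by name: the statement is the Claim_ definition above) =====
theorem find_anchor_triplet_spec : Claim_equal_find_anchor_triplet := by
  intro sc _
  unfold Spec_find_anchor_triplet
  unfold find_anchor_triplet find_anchor_triplet_alt
  by_cases hc : (pvPairCounts sc).size = 0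
  · simp [hc]
  · simp only [hc, if_false]
    have h1 : (PySem.List.combinations (pvUniqueSpecs sc) 3).foldl (pvAStep (pvPairCounts sc)) (none, -1)
        = (PySem.List.combinations (pvUniqueSpecs sc) 3).foldl (pvAStep' (pvPairCounts sc)) (none, -1) := by
      exact PySem.List.foldl_congr_mem _ _ _ _
        (fun st t ht => pv_astep_eq (pvPairCounts sc) (pvUniqueSpecs sc) (pv_specs_lt sc) st t ht)
    rw [h1]
    have h2 := pv_main (pvAllPairs sc) (pvUniqueSpecs sc) (pv_pairs_shape sc) (pv_specs_lt sc)
      (pvUniqueSpecs sc) [] rfl (none, -1)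
    unfold pvPairCounts
    rw [← h2]
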